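-- pv_equiv track=rewrite | github.com/bodhix-ai/cora-dev-toolkit | templates/_modules-core/module-mgmt/backend/layers/lambda-mgmt-common/python/lambda_mgmt_common/schedule.py | are_consecutive_days
-- ===== SOURCE A (Python) =====
-- from typing import Dict, List, Optional, Tuple
--
-- def are_consecutive_days(days: List[str]) -> bool:
--     """
--     Check if days are consecutive in week order.
--
--     Args:
--         days: List of day names (lowercase)
--
--     Returns:
--         True if days are consecutive, False otherwise
--
--     Example:
--         >>> are_consecutive_days(["monday", "tuesday", "wednesday"])
--         True
--         >>> are_consecutive_days(["monday", "wednesday", "friday"])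
--         False
--     """
--     day_order = ["monday", "tuesday", "wednesday", "thursday", "friday", "saturday", "sunday"]
--
--     try:
--         indices = [day_order.index(d.lower()) for d in days]
--     except ValueError:
--         return False
--
--     indices.sort()
--
--     for i in range(len(indices) - 1):
--         if indices[i + 1] - indices[i] != 1:
--             return False
--
--     return True
-- ===== SOURCE B (Python) =====
-- def are_consecutive_days(days):
--     pos = {"monday": 0, "tuesday": 1, "wednesday": 2, "thursday": 3,
--            "friday": 4, "saturday": 5, "sunday": 6}
--     indices = []
--     for d in days:
--         i = pos.get(d.lower())
--         if i is None:
--             return False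
--         indices.append(i)
--     if not indices:
--         return True
--     return len(set(indices)) == len(indices) and max(indices) - min(indices) == len(indices) - 1
-- ===== Notes on version B (the rewrite author's own statement) =====
-- stated objective: simpler
-- what changed: Replace the sort-then-adjacent-pairs scan with a closed-form test (all indices distinct and max-min == len-1) over indices obtained from a precomputed dict instead of repeated list.index calls.
import Mathlib
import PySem

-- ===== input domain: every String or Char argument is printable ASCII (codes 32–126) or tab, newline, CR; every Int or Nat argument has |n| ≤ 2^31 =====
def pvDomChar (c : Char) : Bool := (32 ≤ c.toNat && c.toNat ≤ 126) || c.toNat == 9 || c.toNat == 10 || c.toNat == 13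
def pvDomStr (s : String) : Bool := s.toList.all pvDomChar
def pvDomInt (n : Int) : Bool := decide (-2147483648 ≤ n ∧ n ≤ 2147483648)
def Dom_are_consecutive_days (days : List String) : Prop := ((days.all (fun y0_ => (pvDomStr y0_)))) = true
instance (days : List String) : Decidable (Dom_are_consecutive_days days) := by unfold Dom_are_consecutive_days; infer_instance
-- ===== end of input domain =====

-- B replaces A's sort-and-adjacent-pairs scan by a closed-form test (distinct ∧ max-min = len-1) on indices from a precomputed dict; objective: simpler.

-- ===== PORT A =====
def pvDayOrder : List String :=
  ["monday", "tuesday", "wednesday", "thursday", "friday", "saturday", "sunday"]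

-- the try/except comprehension: none = some day raised ValueError
def pvIdxA : List String → Option (List Int)
  | [] => some []
  | d :: rest =>
    match PySem.List.index? pvDayOrder (PySem.Str.lower d) with
    | none => none
    | some i => (pvIdxA rest).map (fun t => (i : Int) :: t)

-- the for-loop over range(len(indices)-1) with early return False
def pvLoopA (s : List Int) : List Int → Bool
  | [] => true
  | i :: rest =>
    if PySem.List.pyGetD s (i + 1) 0 - PySem.List.pyGetD s i 0 ≠ 1 then false
    else pvLoopA s rest

def are_consecutive_days (days : List String) : Bool :=
  match pvIdxA days with
  | none => false
  | some indices =>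
    let s := PySem.List.sorted indices (fun x => x) false
    pvLoopA s (PySem.List.pyRange 0 ((s.length : Int) - 1) 1)

-- ===== PORT B =====
def pvPos : PySem.Dict String Int :=
  PySem.Dict.ofList [("monday", 0), ("tuesday", 1), ("wednesday", 2), ("thursday", 3),
                     ("friday", 4), ("saturday", 5), ("sunday", 6)]

-- B's collecting loop with early return False on an unknown day
def pvIdxB : List String → Option (List Int)
  | [] => some []
  | d :: rest =>
    match pvPos.get? (PySem.Str.lower d) with
    | none => none
    | some i => (pvIdxB rest).map (fun t => i :: t)

def are_consecutive_days_alt (days : List String) : Bool :=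
  match pvIdxB days with
  | none => false
  | some indices =>
    if indices.isEmpty then true
    else
      match PySem.List.max? indices (fun x => x), PySem.List.min? indices (fun x => x) with
      | some M, some m =>
        ((PySem.Set.ofList indices).length == indices.length) &&
          (M - m == (indices.length : Int) - 1)
      | _, _ => false

-- ===== PRECONDITION & SPEC =====
def Spec_are_consecutive_days (days : List String) (out : Bool) : Prop := out = are_consecutive_days_alt days
instance (days : List String) (out : Bool) : Decidable (Spec_are_consecutive_days days out) := by unfold Spec_are_consecutive_days; infer_instance

-- ===== CLAIM (what is proved, stated in full; the proofs are below) =====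
def Claim_equal_are_consecutive_days : Prop := ∀ (days : List String), Dom_are_consecutive_days days → Spec_are_consecutive_days days (are_consecutive_days days)

-- ===== LEMMAS AND PROOFS =====

-- the precomputed dict lookup agrees with list.index on the fixed 7-day table
theorem pvLookup_eq (x : String) :
    pvPos.get? x = (PySem.List.index? pvDayOrder x).map (fun n => (n : Int)) := by
  by_cases h1 : x = "monday"; · subst h1; decide
  by_cases h2 : x = "tuesday"; · subst h2; decide
  by_cases h3 : x = "wednesday"; · subst h3; decide
  by_cases h4 : x = "thursday"; · subst h4; decide
  by_cases h5 : x = "friday"; · subst h5; decide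
  by_cases h6 : x = "saturday"; · subst h6; decide
  by_cases h7 : x = "sunday"; · subst h7; decide
  have hi : PySem.List.index? pvDayOrder x = none := by
    rw [PySem.List.index?_eq_none_iff]
    simp [pvDayOrder, h1, h2, h3, h4, h5, h6, h7]
  have hm : pvPos = PySem.Dict.mk [("monday", 0), ("tuesday", 1), ("wednesday", 2), ("thursday", 3),
                     ("friday", 4), ("saturday", 5), ("sunday", 6)] := by decide
  rw [hi, hm]
  simp [PySem.Dict.get?, show ¬("monday" == x) = true by simp [Ne.symm h1],
    show ¬("tuesday" == x) = true by simp [Ne.symm h2],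
    show ¬("wednesday" == x) = true by simp [Ne.symm h3],
    show ¬("thursday" == x) = true by simp [Ne.symm h4],
    show ¬("friday" == x) = true by simp [Ne.symm h5],
    show ¬("saturday" == x) = true by simp [Ne.symm h6],
    show ¬("sunday" == x) = true by simp [Ne.symm h7]]

theorem pvIdx_eq (days : List String) : pvIdxB days = pvIdxA days := by
  induction days with
  | nil => rfl
  | cons d rest ih =>
    simp only [pvIdxA, pvIdxB, pvLookup_eq (PySem.Str.lower d), ih]
    cases PySem.List.index? pvDayOrder (PySem.Str.lower d) <;> rfl

theorem pvStepGe (s : List Int)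
    (hmono : ∀ k : Nat, k + 1 < s.length → s.getD k 0 + 1 ≤ s.getD (k+1) 0) :
    ∀ (d k1 : Nat), k1 + d < s.length → (d : Int) ≤ s.getD (k1 + d) 0 - s.getD k1 0 := by
  intro d
  induction d with
  | zero => intro k1 h; simp
  | succ d ih =>
    intro k1 h
    have h1 := hmono (k1 + d) (by omega)
    have h2 := ih k1 (by omega)
    have e : k1 + (d + 1) = (k1 + d) + 1 := by omega
    rw [e]
    push_cast
    omega

theorem pvStepEq (s : List Int)
    (hadj : ∀ k : Nat, k + 1 < s.length → s.getD (k+1) 0 - s.getD k 0 = 1) :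
    ∀ (d k1 : Nat), k1 + d < s.length → s.getD (k1 + d) 0 = s.getD k1 0 + d := by
  intro d
  induction d with
  | zero => intro k1 h; simp
  | succ d ih =>
    intro k1 h
    have h1 := hadj (k1 + d) (by omega)
    have h2 := ih k1 (by omega)
    have e : k1 + (d + 1) = (k1 + d) + 1 := by omega
    rw [e]
    push_cast
    omega

-- the maximum of idx is the last element of its sorted order
theorem pvMax_eq_last (idx : List Int) (M : Int) (s : List Int)
    (hs : s = PySem.List.sorted idx (fun x => x) false)
    (hM : PySem.List.max? idx (fun x => x) = some M)
    (hne : s.length ≠ 0) :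
    M = s.getD (s.length - 1) 0 := by
  have hperm : s.Perm idx := hs ▸ PySem.List.sorted_perm idx (fun x => x) false
  have hpw : s.Pairwise (fun a b => a ≤ b) := hs ▸ PySem.List.sorted_pairwise idx (fun x => x)
  have hmax := PySem.List.max?_isMax hM
  have hMmem : M ∈ s := hperm.mem_iff.mpr (PySem.List.max?_mem hM)
  have hk : s.length - 1 < s.length := by omega
  rw [List.getD_eq_getElem s 0 hk]
  have hlast_mem : s[s.length - 1] ∈ idx := hperm.mem_iff.mp (List.getElem_mem _)
  have h1 : s[s.length - 1] ≤ M := hmax _ hlast_mem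
  have h2 : M ≤ s[s.length - 1] := by
    obtain ⟨i, hi, hiM⟩ := List.getElem_of_mem hMmem
    rcases Nat.lt_or_ge i (s.length - 1) with hlt | hge
    · have := (List.pairwise_iff_getElem.mp hpw) i (s.length - 1) (by omega) (by omega) hlt
      omega
    · have : i = s.length - 1 := by omega
      subst this; omega
  omega

theorem pvMin_eq_head (idx : List Int) (m : Int) (s : List Int)
    (hs : s = PySem.List.sorted idx (fun x => x) false)
    (hm : PySem.List.min? idx (fun x => x) = some m)
    (hne : s.length ≠ 0) :
    m = s.getD 0 0 := by
  have hperm : s.Perm idx := hs ▸ PySem.List.sorted_perm idx (fun x => x) false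
  have hpw : s.Pairwise (fun a b => a ≤ b) := hs ▸ PySem.List.sorted_pairwise idx (fun x => x)
  have hmin := PySem.List.min?_isMin hm
  have hmmem : m ∈ s := hperm.mem_iff.mpr (PySem.List.min?_mem hm)
  have hk : 0 < s.length := by omega
  rw [List.getD_eq_getElem s 0 hk]
  have hhead_mem : s[0] ∈ idx := hperm.mem_iff.mp (List.getElem_mem _)
  have h1 : m ≤ s[0] := hmin _ hhead_mem
  have h2 : s[0] ≤ m := by
    obtain ⟨i, hi, him⟩ := List.getElem_of_mem hmmem
    rcases Nat.eq_zero_or_pos i with h0 | hpos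
    · subst h0; omega
    · have := (List.pairwise_iff_getElem.mp hpw) 0 i (by omega) (by omega) hpos
      omega
  omega

theorem pvSetLen_iff (xs : List Int) : (PySem.Set.ofList xs).length = xs.length ↔ xs.Nodup := by
  have hnd := PySem.Set.nodup_ofList (α := Int) xs
  have hfin : (PySem.Set.ofList xs).toFinset = xs.toFinset := by
    ext a; simp [List.mem_toFinset, PySem.Set.mem_ofList]
  have hlen : (PySem.Set.ofList xs).length = xs.dedup.length := by
    have := List.toFinset_card_of_nodup hnd
    rw [hfin] at this
    rw [← this, List.card_toFinset]
  constructor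
  · intro h
    rw [hlen] at h
    have := List.Sublist.eq_of_length (List.dedup_sublist xs) h
    exact List.dedup_eq_self.mp this
  · intro h
    rw [hlen, List.dedup_eq_self.mpr h]

theorem pvLoopA_eq_all (s : List Int) (r : List Int) :
    pvLoopA s r = r.all (fun i => PySem.List.pyGetD s (i + 1) 0 - PySem.List.pyGetD s i 0 == 1) := by
  induction r with
  | nil => rfl
  | cons i rest ih =>
    simp only [pvLoopA, List.all_cons, ← ih]
    by_cases h : PySem.List.pyGetD s (i + 1) 0 - PySem.List.pyGetD s i 0 = 1 <;> simp [h]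

theorem pvCore (idx : List Int) :
    (pvLoopA (PySem.List.sorted idx (fun x => x) false)
      (PySem.List.pyRange 0 (((PySem.List.sorted idx (fun x => x) false).length : Int) - 1) 1)) =
    (if idx.isEmpty then true
     else
       match PySem.List.max? idx (fun x => x), PySem.List.min? idx (fun x => x) with
       | some M, some m =>
         ((PySem.Set.ofList idx).length == idx.length) && (M - m == (idx.length : Int) - 1)
       | _, _ => false) := by
  by_cases hnil : idx = []
  · subst hnil; decide
  obtain ⟨s, hs⟩ : ∃ s, s = PySem.List.sorted idx (fun x => x) false := ⟨_, rfl⟩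
  rw [← hs]
  have hlen : s.length = idx.length := hs ▸ PySem.List.length_sorted idx (fun x => x) false
  have hpos : 0 < s.length := by
    rcases Nat.eq_zero_or_pos s.length with h0 | h
    · exact absurd (by rw [← List.length_eq_zero_iff, ← hlen]; exact h0) hnil
    · exact h
  have hperm : s.Perm idx := hs ▸ PySem.List.sorted_perm idx (fun x => x) false
  have hpw : s.Pairwise (fun a b => a ≤ b) := hs ▸ PySem.List.sorted_pairwise idx (fun x => x)
  cases hMo : PySem.List.max? idx (fun x => x) with
  | none => exact absurd ((PySem.List.max?_eq_none_iff idx _).mp hMo) hnil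
  | some M =>
  cases hmo : PySem.List.min? idx (fun x => x) with
  | none => exact absurd ((PySem.List.min?_eq_none_iff idx _).mp hmo) hnil
  | some m =>
  have hM : M = s.getD (s.length - 1) 0 := pvMax_eq_last idx M s hs hMo (by omega)
  have hm : m = s.getD 0 0 := pvMin_eq_head idx m s hs hmo (by omega)
  have hie : idx.isEmpty = false := by
    cases idx with | nil => exact absurd rfl hnil | cons a t => rfl
  simp only [hie, Bool.false_eq_true, if_false]
  rw [pvLoopA_eq_all, Bool.eq_iff_iff]
  simp only [List.all_eq_true, PySem.List.mem_pyRange_one, Bool.and_eq_true, beq_iff_eq]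
  constructor
  · intro hadj
    have hadjN : ∀ k : Nat, k + 1 < s.length → s.getD (k+1) 0 - s.getD k 0 = 1 := by
      intro k h
      have hb : (0:Int) ≤ (k:Int) ∧ (k:Int) < (s.length:Int) - 1 := by
        constructor
        · positivity
        · omega
      have := hadj (k:Int) hb
      rw [PySem.List.pyGetD_of_nonneg s (i := (k:Int) + 1) 0 (by omega),
          PySem.List.pyGetD_of_nonneg s (i := (k:Int)) 0 (by omega)] at this
      have e1 : ((k:Int) + 1).toNat = k + 1 := by omega
      have e2 : ((k:Int)).toNat = k := by omega
      rw [e1, e2] at this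
      exact this
    have hstep := pvStepEq s hadjN
    have hnod : s.Nodup := by
      rw [List.nodup_iff_getElem?_ne_getElem?]
      intro i j hij hj
      have hi' : i < s.length := by omega
      have hvi := hstep i 0 (by omega)
      have hvj := hstep j 0 (by omega)
      simp only [Nat.zero_add] at hvi hvj
      rw [List.getElem?_eq_getElem hi', List.getElem?_eq_getElem hj]
      intro hcon
      have hsij : s[i] = s[j] := Option.some.inj hcon
      rw [← List.getD_eq_getElem s 0 hi', ← List.getD_eq_getElem s 0 hj] at hsij
      rw [hvi, hvj] at hsij
      omega
    constructor
    · exact (pvSetLen_iff idx).mpr (hperm.nodup_iff.mp hnod)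
    · have := hstep (s.length - 1) 0 (by omega)
      simp only [Nat.zero_add] at this
      rw [hM, hm, this, ← hlen]
      omega
  · rintro ⟨hset, hdiff⟩
    have hnodidx : idx.Nodup := (pvSetLen_iff idx).mp hset
    have hnod : s.Nodup := hperm.nodup_iff.mpr hnodidx
    have hne : s.Pairwise (fun a b => a ≠ b) := hnod
    have hmono : ∀ k : Nat, k + 1 < s.length → s.getD k 0 + 1 ≤ s.getD (k+1) 0 := by
      intro k h
      have h1 := (List.pairwise_iff_getElem.mp hpw) k (k+1) (by omega) h (by omega)
      have h2 := (List.pairwise_iff_getElem.mp hne) k (k+1) (by omega) h (by omega)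
      rw [List.getD_eq_getElem s 0 (by omega : k < s.length), List.getD_eq_getElem s 0 h]
      omega
    have hgap := pvStepGe s hmono
    have htot : s.getD (s.length - 1) 0 - s.getD 0 0 = (s.length:Int) - 1 := by
      rw [← hM, ← hm, hdiff, hlen]
    intro i hb
    obtain ⟨hb0, hb1⟩ := hb
    have hk : i.toNat + 1 < s.length := by omega
    rw [PySem.List.pyGetD_of_nonneg s (i := i + 1) 0 (by omega),
        PySem.List.pyGetD_of_nonneg s (i := i) 0 (by omega)]
    have e1 : (i + 1).toNat = i.toNat + 1 := by omega
    rw [e1]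
    have hlow := hmono i.toNat hk
    have g1 := hgap i.toNat 0 (by omega)
    simp only [Nat.zero_add] at g1
    have g2 := hgap (s.length - 1 - (i.toNat + 1)) (i.toNat + 1) (by omega)
    have e2 : i.toNat + 1 + (s.length - 1 - (i.toNat + 1)) = s.length - 1 := by omega
    rw [e2] at g2
    omega

-- ===== VERDICT (by name: the statement is the Claim_ definition above) =====
theorem are_consecutive_days_spec : Claim_equal_are_consecutive_days := by
  intro days _
  unfold Spec_are_consecutive_days are_consecutive_days are_consecutive_days_alt
  rw [pvIdx_eq]
  cases pvIdxA days with
  | none => rfl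
  | some idx => exact pvCore idx
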